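/- GENERATED by c/gen_decode.py: decode facts of the image, one per distinct instruction byte string. -/
import UserX.DecodeImage

#decode_all ProgX.Base.Dec
  "40f6c70f"  -- test dil,0xf
  "4839c8"  -- cmp rax,rcx
  "4889042568f01f00"  -- mov QWORD PTR ds:0x1ff068,rax
  "4889fe"  -- mov rsi,rdi
  "48c1ea03"  -- shr rdx,0x3
  "498d3446"  -- lea rsi,[r14+rax*2]
  "53"  -- push rbx
  "660f570547d50300"  -- xorpd xmm0,XMMWORD PTR [rip+0x3d547]
  "7419"  -- je 1024d5
  "771c"  -- ja 100325
  "83e007"  -- and eax,0x7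
  "be00000000"  -- mov esi,0x0
  "e85b0e0000"  -- call 100e60
  "e8d5d8ffff"  -- call 101440
  "eb26"  -- jmp 101484
  "f20f100db8e20300"  -- movsd xmm1,QWORD PTR [rip+0x3e2b8]
  "f20f58d8"  -- addsd xmm3,xmm0
  "f20f5cc8"  -- subsd xmm1,xmm0
  "f20f5e1dfbda0300"  -- divsd xmm3,QWORD PTR [rip+0x3dafb]
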